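-- pv_equiv track=rewrite | github.com/jchenghu/ExpansionNet_v2 | utils/language_utils.py | tokens2description
-- ===== SOURCE A (Python) =====
-- def convert_vector_idx2word(sentence, idx2word_list):
--     return [idx2word_list[idx] for idx in sentence]
--
-- def tokens2description(tokens, idx2word_list, sos_idx, eos_idx):
--     desc = []
--     for tok in tokens:
--         if tok == sos_idx:
--             continue
--         if tok == eos_idx:
--             break
--         desc.append(tok)
--     desc = convert_vector_idx2word(desc, idx2word_list)
--     desc[-1] = desc[-1] + '.'
--     pred = ' '.join(desc).capitalize()
--     return pred
-- ===== SOURCE B (Python) =====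
-- def tokens2description(tokens, idx2word_list, sos_idx, eos_idx):
--     kept = [t for t in tokens if t != sos_idx]
--     if eos_idx in kept:
--         kept = kept[:kept.index(eos_idx)]
--     words = [idx2word_list[i] for i in kept]
--     return ' '.join(words[:-1] + [words[-1] + '.']).capitalize()
-- ===== Notes on version B (the rewrite author's own statement) =====
-- stated objective: simpler
-- what changed: Replaces the fused loop with continue/break and the in-place last-element mutation by a filter comprehension, a membership-guarded index/slice truncation at the first eos, and a slice-based rebuild of the word list; no mutation, no break.
import Mathlib
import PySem

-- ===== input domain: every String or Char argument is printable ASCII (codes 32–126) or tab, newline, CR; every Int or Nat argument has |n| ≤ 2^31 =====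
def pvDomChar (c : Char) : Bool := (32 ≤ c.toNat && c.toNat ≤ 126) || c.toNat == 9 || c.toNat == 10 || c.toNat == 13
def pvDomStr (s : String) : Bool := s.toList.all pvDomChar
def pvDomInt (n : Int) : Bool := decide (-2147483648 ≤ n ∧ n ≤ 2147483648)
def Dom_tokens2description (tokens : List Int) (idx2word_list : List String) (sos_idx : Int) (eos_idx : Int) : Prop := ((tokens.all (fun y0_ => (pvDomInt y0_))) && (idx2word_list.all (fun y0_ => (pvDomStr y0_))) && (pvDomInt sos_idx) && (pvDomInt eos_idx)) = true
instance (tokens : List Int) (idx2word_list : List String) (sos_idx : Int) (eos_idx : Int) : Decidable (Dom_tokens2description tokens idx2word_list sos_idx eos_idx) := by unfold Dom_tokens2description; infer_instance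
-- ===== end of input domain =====

-- B replaces A's fused continue/break loop and in-place mutation by filter, index/slice truncation and a slice rebuild (objective: simpler).

-- str.capitalize(): first char uppercased, the rest lowercased (exact on the ASCII domain)
def pyCapitalize (cs : List Char) : List Char :=
  match cs with
  | [] => []
  | c :: rest => PySem.Chars.upperChar c :: PySem.Chars.lower rest

-- ===== PORT A =====
-- the fused loop: 'continue' on sos, 'break' on eos, else append
def tdLoopA (sos eos : Int) : List Int → List Int
  | [] => []
  | t :: ts => if t == sos then tdLoopA sos eos ts
               else if t == eos then []
               else t :: tdLoopA sos eos ts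

-- desc[-1] = desc[-1] + '.'  (on [] Python raises IndexError; excluded by Pre_)
def setLastDotA : List String → List String
  | [] => []
  | [w] => [String.ofList (w.toList ++ ['.'])]
  | w :: ws => w :: setLastDotA ws

def tokens2description (tokens : List Int) (idx2word_list : List String) (sos_idx : Int) (eos_idx : Int) : String :=
  let desc := tdLoopA sos_idx eos_idx tokens
  let words := desc.map (fun idx => (PySem.List.pyGet? idx2word_list idx).getD "")
  let words := setLastDotA words
  String.ofList (pyCapitalize (PySem.Chars.join [' '] (words.map String.toList)))

-- ===== PORT B =====
def tokens2description_alt (tokens : List Int) (idx2word_list : List String) (sos_idx : Int) (eos_idx : Int) : String :=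
  let kept := tokens.filter (fun t => !(t == sos_idx))
  let kept := if kept.contains eos_idx
              then PySem.List.slice kept none (some (((PySem.List.index? kept eos_idx).getD 0 : Nat) : Int))
              else kept
  let words := kept.map (fun i => (PySem.List.pyGet? idx2word_list i).getD "")
  let words := PySem.List.slice words none (some (-1))
               ++ [String.ofList (((PySem.List.pyGet? words (-1)).getD "").toList ++ ['.'])]
  String.ofList (pyCapitalize (PySem.Chars.join [' '] (words.map String.toList)))

-- ===== PRECONDITION & SPEC =====
-- Pre_ excludes exactly the inputs on which A raises: an empty selected prefix (desc[-1] IndexError)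
-- or a selected token outside Python's index range for idx2word_list (IndexError in the lookup).
def Pre_tokens2description (tokens : List Int) (idx2word_list : List String) (sos_idx : Int) (eos_idx : Int) : Prop :=
  let kept := (tokens.filter (fun t => !(t == sos_idx))).takeWhile (fun t => !(t == eos_idx))
  kept ≠ [] ∧ ∀ t ∈ kept, -(idx2word_list.length : Int) ≤ t ∧ t < idx2word_list.length

instance (tokens : List Int) (idx2word_list : List String) (sos_idx : Int) (eos_idx : Int) : Decidable (Pre_tokens2description tokens idx2word_list sos_idx eos_idx) := by unfold Pre_tokens2description; infer_instance

def pvWitness_tokens2description : List Int × List String × Int × Int := ([0, 1], ["hello", "World"], 7, 9)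

def Spec_tokens2description (tokens : List Int) (idx2word_list : List String) (sos_idx : Int) (eos_idx : Int) (out : String) : Prop := out = tokens2description_alt tokens idx2word_list sos_idx eos_idx
instance (tokens : List Int) (idx2word_list : List String) (sos_idx : Int) (eos_idx : Int) (out : String) : Decidable (Spec_tokens2description tokens idx2word_list sos_idx eos_idx out) := by unfold Spec_tokens2description; infer_instance

-- ===== CLAIM (what is proved, stated in full; the proofs are below) =====
def Claim_equal_tokens2description : Prop := ∀ (tokens : List Int) (idx2word_list : List String) (sos_idx : Int) (eos_idx : Int), Dom_tokens2description tokens idx2word_list sos_idx eos_idx → Pre_tokens2description tokens idx2word_list sos_idx eos_idx → Spec_tokens2description tokens idx2word_list sos_idx eos_idx (tokens2description tokens idx2word_list sos_idx eos_idx)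

-- ===== LEMMAS AND PROOFS =====

-- A's fused loop computes takeWhile-of-filter
theorem tdLoopA_eq (sos eos : Int) (ts : List Int) :
    tdLoopA sos eos ts = (ts.filter (fun t => !(t == sos))).takeWhile (fun t => !(t == eos)) := by
  induction ts with
  | nil => rfl
  | cons t ts ih =>
    by_cases hs : t = sos
    · simp [tdLoopA, hs, ih]
    · by_cases he : t = eos
      · subst he
        simp [tdLoopA, hs]
      · simp [tdLoopA, hs, he, ih]

-- B's truncation equals takeWhile on the filtered list
theorem trunc_eq_takeWhile (eos : Int) (l : List Int) :
    (if l.contains eos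
     then PySem.List.slice l none (some (((PySem.List.index? l eos).getD 0 : Nat) : Int))
     else l) = l.takeWhile (fun t => !(t == eos)) := by
  by_cases hm : eos ∈ l
  · have hi : (PySem.List.index? l eos).isSome := (PySem.List.index?_isSome_iff l eos).mpr hm
    obtain ⟨k, hk⟩ := Option.isSome_iff_exists.mp hi
    rw [if_pos (by simpa using hm), hk, Option.getD_some, PySem.List.slice_to_natCast]
    obtain ⟨pre, suf, hl, hpre, hnot⟩ := (PySem.List.index?_eq_some_iff _ _ _).mp hk
    subst hl hpre
    rw [List.take_left, List.takeWhile_append_of_pos (by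
      intro a ha
      have : a ≠ eos := fun hh => hnot (hh ▸ ha)
      simpa using this)]
    simp [List.takeWhile]
  · rw [if_neg (by simpa using hm)]
    refine (List.takeWhile_eq_self_iff.mpr ?_).symm
    intro x hx
    have : x ≠ eos := fun hh => hm (hh ▸ hx)
    simpa using this

-- A's last-element mutation on init ++ [x]
theorem setLastDotA_append (init : List String) (x : String) :
    setLastDotA (init ++ [x]) = init ++ [String.ofList (x.toList ++ ['.'])] := by
  induction init with
  | nil => rfl
  | cons w init ih =>
    obtain ⟨y, l, hyl⟩ : ∃ y l, init ++ [x] = y :: l := by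
      cases init with
      | nil => exact ⟨x, [], rfl⟩
      | cons a b => exact ⟨a, b ++ [x], rfl⟩
    calc setLastDotA ((w :: init) ++ [x]) = w :: setLastDotA (init ++ [x]) := by
            rw [List.cons_append, hyl]; rfl
      _ = w :: (init ++ [String.ofList (x.toList ++ ['.'])]) := by rw [ih]
      _ = (w :: init) ++ [String.ofList (x.toList ++ ['.'])] := rfl

-- A's last-element mutation equals B's slice rebuild, on nonempty lists
theorem setLastDotA_eq (ws : List String) (h : ws ≠ []) :
    setLastDotA ws = PySem.List.slice ws none (some (-1))
      ++ [String.ofList (((PySem.List.pyGet? ws (-1)).getD "").toList ++ ['.'])] := by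
  rcases List.eq_nil_or_concat ws with rfl | ⟨init, x, rfl⟩
  · exact absurd rfl h
  · rw [List.concat_eq_append, setLastDotA_append, PySem.List.slice_to_neg_one, List.dropLast_concat,
        PySem.List.pyGet?_neg_one_append_singleton, Option.getD_some]

theorem tokens2description_eq_alt (tokens : List Int) (idx2word_list : List String) (sos_idx eos_idx : Int)
    (hp : Pre_tokens2description tokens idx2word_list sos_idx eos_idx) :
    tokens2description tokens idx2word_list sos_idx eos_idx
      = tokens2description_alt tokens idx2word_list sos_idx eos_idx := by
  unfold Pre_tokens2description at hp
  obtain ⟨hne, _⟩ := hp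
  simp only [tokens2description, tokens2description_alt]
  rw [tdLoopA_eq, trunc_eq_takeWhile]
  have hwne : (((tokens.filter (fun t => !(t == sos_idx))).takeWhile (fun t => !(t == eos_idx))).map
      (fun i => (PySem.List.pyGet? idx2word_list i).getD "")) ≠ [] := by
    simpa using hne
  rw [setLastDotA_eq _ hwne]

-- ===== VERDICT (by name: the statement is the Claim_ definition above) =====
theorem tokens2description_spec : Claim_equal_tokens2description := by
  intro tokens idx2word_list sos_idx eos_idx _ hp
  unfold Spec_tokens2description
  exact tokens2description_eq_alt tokens idx2word_list sos_idx eos_idx hp
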